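-- pv_equiv track=rewrite | github.com/alexkato29/advent-of-code | 2025/day10/b.py | get_states
-- ===== SOURCE A (Python) =====
-- from itertools import combinations
--
-- def get_states(buttons: list[tuple[int]]) -> dict[tuple[int], int]:
--     states = {}
--     num_buttons = len(buttons)
--     num_variables = len(buttons[0])
--     for pattern_len in range(num_buttons + 1):
--         for combo in combinations(range(num_buttons), pattern_len):
--             pattern = tuple(map(sum, zip((0,) * num_variables, *(buttons[i] for i in combo))))
--             if pattern not in states:
--                 states[pattern] = pattern_len
--     return states
-- ===== SOURCE B (Python) =====
-- def get_states(buttons):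
--     zero = tuple([0] * len(buttons[0]))
--     states = {}
--     frontier = [(zero, list(buttons))]
--     for k in range(len(buttons) + 1):
--         next_frontier = []
--         for pattern, rest in frontier:
--             if pattern not in states:
--                 states[pattern] = k
--             for i, row in enumerate(rest):
--                 ext = tuple(x + y for x, y in zip(pattern, row))
--                 next_frontier.append((ext, rest[i + 1:]))
--         frontier = next_frontier
--     return states
-- ===== Notes on version B (the rewrite author's own statement) =====
-- stated objective: alternative
-- what changed: Instead of enumerating itertools.combinations and re-summing every subset from scratch, B grows a level-by-level frontier of (partial sum, remaining suffix) pairs, extending each partial sum by one remaining row at a time.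
import Mathlib
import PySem

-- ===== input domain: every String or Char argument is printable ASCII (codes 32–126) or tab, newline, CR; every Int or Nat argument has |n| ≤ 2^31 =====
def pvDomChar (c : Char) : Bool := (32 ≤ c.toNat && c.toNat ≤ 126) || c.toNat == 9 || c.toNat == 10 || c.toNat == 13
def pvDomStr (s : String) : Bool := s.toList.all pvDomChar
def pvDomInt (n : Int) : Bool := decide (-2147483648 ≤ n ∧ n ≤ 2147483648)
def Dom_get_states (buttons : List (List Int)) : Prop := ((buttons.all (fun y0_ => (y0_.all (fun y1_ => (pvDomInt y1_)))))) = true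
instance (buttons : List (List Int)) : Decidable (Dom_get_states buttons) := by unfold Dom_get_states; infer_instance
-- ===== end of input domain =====

-- B replaces the per-subset re-summation over itertools.combinations by a level-by-level
-- frontier that extends each partial sum with one remaining row at a time (alternative algorithm).

-- ===== PORT A =====
-- itertools.combinations(l, k): the k-element subsequences of l in lexicographic order
def pyCombinations {α : Type} (k : Nat) (l : List α) : List (List α) :=
  match k, l with
  | 0, _ => [[]]
  | _ + 1, [] => []
  | k + 1, x :: xs => (pyCombinations k xs).map (x :: ·) ++ pyCombinations (k + 1) xs

-- tuple(map(sum, zip(*ls))): column sums of ls truncated to the shortest list (Python zip)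
def colSum (ls : List (List Int)) : List Int :=
  let m := ls.foldl (fun a l => min a l.length) ((ls.headD []).length)
  (List.range m).map (fun j => (ls.map (fun l => l.getD j 0)).sum)

def get_states (buttons : List (List Int)) : List (List Int × Int) :=
  -- dict[tuple,int] as an insertion-ordered association list; buttons[0] raises on [] (Pre_)
  let num_buttons := buttons.length
  let num_variables := (buttons.headD []).length
  (List.range (num_buttons + 1)).foldl (fun states pattern_len =>
    (pyCombinations pattern_len (List.range num_buttons)).foldl (fun states combo =>
      let pattern := colSum (List.replicate num_variables (0 : Int) :: combo.map (fun i => buttons.getD i []))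
      if pattern ∈ states.map Prod.fst then states else states ++ [(pattern, (pattern_len : Int))])
      states) []

-- ===== PORT B =====
-- inner 'for i, row in enumerate(rest)': extend pattern by each row, keep the suffix after it
def extendB (pattern : List Int) (rest : List (List Int)) : List (List Int × List (List Int)) :=
  match rest with
  | [] => []
  | r :: rs => (List.zipWith (· + ·) pattern r, rs) :: extendB pattern rs

def get_states_alt (buttons : List (List Int)) : List (List Int × Int) :=
  let zero := List.replicate (buttons.headD []).length (0 : Int)
  ((List.range (buttons.length + 1)).foldl
    (fun st k =>
      st.2.foldl
        (fun acc pr =>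
          ((if pr.1 ∈ acc.1.map Prod.fst then acc.1 else acc.1 ++ [(pr.1, (k : Int))]),
           acc.2 ++ extendB pr.1 pr.2))
        (st.1, []))
    ([], [(zero, buttons)])).1

-- ===== PRECONDITION & SPEC =====
-- A evaluates buttons[0], which raises IndexError on the empty list (B raises there too): Pre_ excludes exactly [].
def Pre_get_states (buttons : List (List Int)) : Prop := buttons ≠ []
instance (buttons : List (List Int)) : Decidable (Pre_get_states buttons) := by unfold Pre_get_states; infer_instance
def pvWitness_get_states : List (List Int) := [[1, 0], [0, 2]]

def Spec_get_states (buttons : List (List Int)) (out : List (List Int × Int)) : Prop := out = get_states_alt buttons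
instance (buttons : List (List Int)) (out : List (List Int × Int)) : Decidable (Spec_get_states buttons out) := by unfold Spec_get_states; infer_instance

-- ===== CLAIM (what is proved, stated in full; the proofs are below) =====
def Claim_equal_get_states : Prop := ∀ (buttons : List (List Int)), Dom_get_states buttons → Pre_get_states buttons → Spec_get_states buttons (get_states buttons)

-- ===== LEMMAS AND PROOFS =====

def padd (p q : List Int) : List Int := List.zipWith (· + ·) p q

-- insert-if-absent into the insertion-ordered association list
def ins (st : List (List Int × Int)) (p : List Int) (v : Int) : List (List Int × Int) :=
  if p ∈ st.map Prod.fst then st else st ++ [(p, v)]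

theorem ins_eq (st : List (List Int × Int)) (p : List Int) (v : Int) :
    (if p ∈ st.map Prod.fst then st else st ++ [(p, v)]) = ins st p v := rfl

-- combinations together with the suffix of the source list after the last chosen element
def combosS {α : Type} : Nat → List α → List (List α × List α)
  | 0, l => [([], l)]
  | _ + 1, [] => []
  | k + 1, x :: xs => (combosS k xs).map (fun cs => (x :: cs.1, cs.2)) ++ combosS (k + 1) xs

def picks {α : Type} : List α → List (α × List α)
  | [] => []
  | x :: xs => (x, xs) :: picks xs

theorem combosS_fst {α : Type} : ∀ (l : List α) (k : Nat), (combosS k l).map Prod.fst = pyCombinations k l := by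
  intro l
  induction l with
  | nil => intro k; cases k <;> simp [combosS, pyCombinations]
  | cons x xs ih =>
    intro k
    cases k with
    | zero => simp [combosS, pyCombinations]
    | succ k => simp [combosS, pyCombinations, List.map_map, Function.comp_def, ← ih]

theorem combosS_one {α : Type} : ∀ (l : List α), combosS 1 l = (picks l).map (fun p => ([p.1], p.2)) := by
  intro l
  induction l with
  | nil => simp [combosS, picks]
  | cons x xs ih => simp [combosS, picks, ih]

theorem combosS_succ {α : Type} : ∀ (l : List α) (k : Nat),
    combosS (k + 1) l = (combosS k l).flatMap (fun cs => (picks cs.2).map (fun p => (cs.1 ++ [p.1], p.2))) := by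
  intro l
  induction l with
  | nil => intro k; cases k <;> simp [combosS, picks]
  | cons x xs ih =>
    intro k
    cases k with
    | zero => simp [combosS, picks, combosS_one]
    | succ k =>
      show (combosS (k + 1) xs).map (fun cs => (x :: cs.1, cs.2)) ++ combosS (k + 2) xs
          = ((combosS k xs).map (fun cs => (x :: cs.1, cs.2)) ++ combosS (k + 1) xs).flatMap
              (fun cs => (picks cs.2).map (fun p => (cs.1 ++ [p.1], p.2)))
      rw [List.flatMap_append, ← ih (k + 1), ih k, List.flatMap_map, List.map_flatMap]
      congr 1
      apply List.flatMap_congr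
      intro cs _
      simp [List.map_map]

theorem extendB_eq (p : List Int) : ∀ (rest : List (List Int)),
    extendB p rest = (picks rest).map (fun q => (padd p q.1, q.2)) := by
  intro rest
  induction rest with
  | nil => simp [extendB, picks]
  | cons r rs ih => simp [extendB, picks, ih, padd]

theorem flm_le : ∀ (r : List (List Int)) (i : Nat),
    List.foldl (fun a (l : List Int) => min a l.length) i r ≤ i := by
  intro r
  induction r with
  | nil => intro i; simp
  | cons x xs ih => intro i; exact le_trans (ih (min i x.length)) (Nat.min_le_left _ _)

theorem colSum_single (z : List Int) : colSum [z] = z := by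
  simp only [colSum, List.foldl_cons, List.foldl_nil, List.headD, Nat.min_self]
  apply List.ext_getElem
  · simp
  · intro j h1 h2
    simp at h1
    simp [List.getD_eq_getElem?_getD, h1]

theorem getD_padd (a b : List Int) (j : Nat) (h1 : j < a.length) (h2 : j < b.length) :
    (padd a b).getD j 0 = a.getD j 0 + b.getD j 0 := by
  have hl : j < (padd a b).length := by simp [padd]; omega
  rw [List.getD_eq_getElem _ _ hl, List.getD_eq_getElem _ _ h1, List.getD_eq_getElem _ _ h2]
  simp [padd]

theorem colSum_cons_cons (a b : List Int) (r : List (List Int)) :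
    colSum (a :: b :: r) = colSum (padd a b :: r) := by
  have hpl : (padd a b).length = min a.length b.length := by simp [padd]
  have hm : List.foldl (fun a (l : List Int) => min a l.length) a.length (a :: b :: r)
      = List.foldl (fun a (l : List Int) => min a l.length) (padd a b).length (padd a b :: r) := by
    simp only [List.foldl_cons, Nat.min_self, hpl]
  simp only [colSum, List.headD]
  rw [hm]
  set m := List.foldl (fun a (l : List Int) => min a l.length) (padd a b).length (padd a b :: r) with hmdef
  have hle : m ≤ (padd a b).length := by
    rw [hmdef]; simp only [List.foldl_cons, Nat.min_self]; exact flm_le r _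
  apply List.map_congr_left
  intro j hj
  have hjm : j < m := List.mem_range.mp hj
  have ha : j < a.length := by omega
  have hb : j < b.length := by omega
  simp only [List.map_cons, List.sum_cons]
  rw [getD_padd a b j ha hb]
  ring

theorem colSum_fold : ∀ (rows : List (List Int)) (z : List Int),
    colSum (z :: rows) = rows.foldl padd z := by
  intro rows
  induction rows with
  | nil => intro z; simpa using colSum_single z
  | cons r rs ih => intro z; rw [colSum_cons_cons, ih]; rfl

theorem pyCombinations_map {α β : Type} (f : α → β) : ∀ (l : List α) (k : Nat),
    (pyCombinations k l).map (List.map f) = pyCombinations k (l.map f) := by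
  intro l
  induction l with
  | nil => intro k; cases k <;> simp [pyCombinations]
  | cons x xs ih =>
    intro k
    cases k with
    | zero => simp [pyCombinations]
    | succ k => simp [pyCombinations, List.map_map, Function.comp_def, ← ih]

theorem range_getD (buttons : List (List Int)) :
    (List.range buttons.length).map (fun i => buttons.getD i []) = buttons := by
  apply List.ext_getElem
  · simp
  · intro j h1 h2
    simp only [List.getElem_map, List.getElem_range]
    exact List.getD_eq_getElem _ _ h2

-- the frontier after k iterations of B's outer loop
def front (buttons : List (List Int)) (k : Nat) : List (List Int × List (List Int)) :=
  (combosS k buttons).map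
    (fun cs => (cs.1.foldl padd (List.replicate (buttons.headD []).length (0 : Int)), cs.2))

theorem front_zero (buttons : List (List Int)) :
    front buttons 0 = [(List.replicate (buttons.headD []).length (0 : Int), buttons)] := by
  simp [front, combosS]

theorem front_succ (buttons : List (List Int)) (k : Nat) :
    front buttons (k + 1) = (front buttons k).flatMap (fun pr => extendB pr.1 pr.2) := by
  simp only [front, combosS_succ, List.map_flatMap, List.flatMap_map]
  apply List.flatMap_congr
  intro cs _
  rw [extendB_eq]
  simp [List.map_map, List.foldl_append, Function.comp_def]

-- B's inner fold splits into the states fold and the flatMap of extensions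
theorem innerB (k : Nat) : ∀ (frontier : List (List Int × List (List Int)))
    (states : List (List Int × Int)) (acc : List (List Int × List (List Int))),
    frontier.foldl
      (fun acc pr => (ins acc.1 pr.1 (k : Int), acc.2 ++ extendB pr.1 pr.2)) (states, acc)
    = (frontier.foldl (fun st pr => ins st pr.1 (k : Int)) states,
       acc ++ frontier.flatMap (fun pr => extendB pr.1 pr.2)) := by
  intro frontier
  induction frontier with
  | nil => intro states acc; simp
  | cons pr rest ih =>
    intro states acc
    simp only [List.foldl_cons, List.flatMap_cons]
    rw [ih]
    simp [List.append_assoc]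

-- the sequence of insertions at level k is the same for the two ports
theorem level_states (buttons : List (List Int)) (k : Nat) (states : List (List Int × Int)) :
    (front buttons k).foldl (fun st pr => ins st pr.1 (k : Int)) states
    = (pyCombinations k (List.range buttons.length)).foldl
        (fun states combo =>
          ins states (colSum (List.replicate (buttons.headD []).length (0 : Int)
            :: combo.map (fun i => buttons.getD i []))) (k : Int)) states := by
  have hmap : (front buttons k).map Prod.fst
      = (pyCombinations k (List.range buttons.length)).map
          (fun combo => colSum (List.replicate (buttons.headD []).length (0 : Int)
            :: combo.map (fun i => buttons.getD i []))) := by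
    have h1 : (front buttons k).map Prod.fst
        = (pyCombinations k buttons).map
            (fun c => c.foldl padd (List.replicate (buttons.headD []).length (0 : Int))) := by
      rw [← combosS_fst buttons k]
      simp [front, List.map_map, Function.comp_def]
    have h2 : pyCombinations k buttons
        = (pyCombinations k (List.range buttons.length)).map
            (List.map (fun i => buttons.getD i [])) := by
      rw [pyCombinations_map, range_getD]
    rw [h1, h2, List.map_map]
    apply List.map_congr_left
    intro c _
    simp only [Function.comp_def]
    exact (colSum_fold (c.map (fun i => buttons.getD i [])) _).symm
  calc
    (front buttons k).foldl (fun st pr => ins st pr.1 (k : Int)) states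
        = ((front buttons k).map Prod.fst).foldl (fun st p => ins st p (k : Int)) states :=
          by rw [List.foldl_map]
    _ = ((pyCombinations k (List.range buttons.length)).map
          (fun combo => colSum (List.replicate (buttons.headD []).length (0 : Int)
            :: combo.map (fun i => buttons.getD i [])))).foldl
          (fun st p => ins st p (k : Int)) states := by rw [hmap]
    _ = _ := by rw [List.foldl_map]

theorem main_fold (buttons : List (List Int)) : ∀ (m k : Nat) (states : List (List Int × Int)),
    ((List.range' k m).foldl
      (fun st k =>
        st.2.foldl
          (fun acc pr => (ins acc.1 pr.1 (k : Int), acc.2 ++ extendB pr.1 pr.2)) (st.1, []))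
      (states, front buttons k)).1
    = (List.range' k m).foldl
        (fun states pattern_len =>
          (pyCombinations pattern_len (List.range buttons.length)).foldl
            (fun states combo =>
              ins states (colSum (List.replicate (buttons.headD []).length (0 : Int)
                :: combo.map (fun i => buttons.getD i []))) (pattern_len : Int)) states) states := by
  intro m
  induction m with
  | zero => intro k states; simp
  | succ m ih =>
    intro k states
    rw [List.range'_succ]
    simp only [List.foldl_cons]
    rw [innerB k (front buttons k) states []]
    simp only [List.nil_append]
    rw [← front_succ, ih (k + 1), level_states]

-- ===== VERDICT (by name: the statement is the Claim_ definition above) =====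
theorem get_states_spec : Claim_equal_get_states := by
  intro buttons _ _
  unfold Spec_get_states
  simp only [get_states, get_states_alt, ins_eq]
  have h := main_fold buttons (buttons.length + 1) 0 []
  rw [← List.range_eq_range', front_zero] at h
  exact h.symm
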